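-- pv_equiv track=rewrite | github.com/JacksonDonaldson/euler | euler/61-70/65.py | findApproximation
-- ===== SOURCE A (Python) =====
-- def geneList(length):
--     l = []
--     for i in range(1,int(length/3)+1):
--         l.append(1)
--         l.append(i*2)
--         l.append(1)
--     return l
--
-- def collapseFraction(num, fract):
--     #takes a number and a fraction, and returns a fraction representing them added together
--     fract[0] += num * fract[1]
--     return fract.copy()
--
-- def findApproximation(length):
--     divisors = geneList(length)
--
--     workingDenom = collapseFraction(divisors[length-2],[1,divisors[length-1]])
--
--     for i in range(length-3,-1,-1):
--
--         #represents the "1/" this fraction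
--         workingDenom.reverse()
--
--         workingDenom = collapseFraction(divisors[i],workingDenom)
--     workingDenom.reverse()
--
--     return workingDenom
-- ===== SOURCE B (Python) =====
-- def geneList(length):
--     l = []
--     for i in range(1, int(length / 3) + 1):
--         l.append(1)
--         l.append(i * 2)
--         l.append(1)
--     return l
--
--
-- def findApproximation(length):
--     # Forward Wallis recurrence for the continued-fraction convergent:
--     # p_k = a_k*p_{k-1} + p_{k-2}, q_k likewise; returns [denominator, numerator].
--     a = geneList(length)
--     p_prev, p = 1, a[0]
--     q_prev, q = 0, 1
--     for i in range(1, length):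
--         p_prev, p = p, a[i] * p + p_prev
--         q_prev, q = q, a[i] * q + q_prev
--     return [q, p]
-- ===== Notes on version B (the rewrite author's own statement) =====
-- stated objective: alternative
-- what changed: A evaluates the continued fraction back-to-front, maintaining a [numerator, denominator] list that it reverses and collapses at each step; B computes the same convergent front-to-back with the standard Wallis recurrence p_k = a_k*p_{k-1} + p_{k-2}, q_k = a_k*q_{k-1} + q_{k-2} seeded from the first term, returning [q, p]; on lengths A rejects (not a positive multiple of 3) B raises the same IndexError.
import Mathlib
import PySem

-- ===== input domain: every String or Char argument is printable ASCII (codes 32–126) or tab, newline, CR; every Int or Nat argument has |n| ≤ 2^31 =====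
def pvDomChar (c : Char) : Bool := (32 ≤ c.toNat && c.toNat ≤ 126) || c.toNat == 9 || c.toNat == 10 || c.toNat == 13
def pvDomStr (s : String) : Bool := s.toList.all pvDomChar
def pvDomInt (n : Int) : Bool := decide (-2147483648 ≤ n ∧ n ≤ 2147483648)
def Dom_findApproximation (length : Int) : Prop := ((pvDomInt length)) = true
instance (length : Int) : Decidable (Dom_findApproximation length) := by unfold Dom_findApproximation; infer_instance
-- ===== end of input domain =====

-- B replaces A's backward reverse-and-collapse evaluation of the continued fraction by the
-- forward Wallis recurrence on numerator/denominator pairs (alternative decomposition, same cost).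
-- A's collapseFraction mutates its list argument, but only lists freshly built inside
-- findApproximation, so no caller-observable mutation is involved.

-- ===== PORT A =====
-- int(length/3) (float true division, then truncation toward zero) equals truncated integer
-- division exactly for |length| ≤ 2^31 (the Dom bound): ported as Int.tdiv.
def geneList (length : Int) : List Int :=
  (PySem.List.pyRange 1 (length.tdiv 3 + 1) 1).foldl (fun l i => l ++ [1, i * 2, 1]) []

def collapseFraction (num : Int) (fract : List Int) : List Int :=
  match fract with
  | a :: b :: rest => (a + num * b) :: b :: rest
  | l => l  -- fract[1] missing: Python raises IndexError here (excluded by Pre_)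

def findApproximation (length : Int) : List Int :=
  let divisors := geneList length
  -- divisors[length-2] / divisors[length-1] raise IndexError outside Pre_; the pyGetD default is unclaimed there
  let workingDenom := collapseFraction (PySem.List.pyGetD divisors (length - 2) 0)
      [1, PySem.List.pyGetD divisors (length - 1) 0]
  let workingDenom := (PySem.List.pyRange (length - 3) (-1) (-1)).foldl
      (fun wd i => collapseFraction (PySem.List.pyGetD divisors i 0) wd.reverse) workingDenom
  workingDenom.reverse

-- ===== PORT B =====
-- state s = (p_prev, p, q_prev, q), seeded from a[0] (IndexError outside Pre_, like A);
-- B's Python geneList is identical to A's, shared above.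
def findApproximation_alt (length : Int) : List Int :=
  let a := geneList length
  let s := (PySem.List.pyRange 1 length 1).foldl
      (fun (s : Int × Int × Int × Int) i =>
        (s.2.1, PySem.List.pyGetD a i 0 * s.2.1 + s.1,
         s.2.2.2, PySem.List.pyGetD a i 0 * s.2.2.2 + s.2.2.1))
      (1, PySem.List.pyGetD a 0 0, 0, 1)
  [s.2.2.2, s.2.1]

-- ===== PRECONDITION & SPEC =====
-- A raises IndexError unless length is a positive multiple of 3 (geneList has 3*(length//3)
-- elements, and divisors[length-1] must exist); Pre_ admits exactly the lengths A returns on.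
def Pre_findApproximation (length : Int) : Prop := 3 ≤ length ∧ PySem.Int.mod length 3 = 0
instance (length : Int) : Decidable (Pre_findApproximation length) := by unfold Pre_findApproximation; infer_instance
def pvWitness_findApproximation : Int := 3

def Spec_findApproximation (length : Int) (out : List Int) : Prop := out = findApproximation_alt length
instance (length : Int) (out : List Int) : Decidable (Spec_findApproximation length out) := by unfold Spec_findApproximation; infer_instance

-- ===== CLAIM (what is proved, stated in full; the proofs are below) =====
def Claim_equal_findApproximation : Prop := ∀ (length : Int), Dom_findApproximation length → Pre_findApproximation length → Spec_findApproximation length (findApproximation length)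

-- ===== LEMMAS AND PROOFS =====

def contK : List Int → Int
  | [] => 1
  | [x] => x
  | x :: y :: r => x * contK (y :: r) + contK r
def contKd : List Int → Int
  | [] => 0
  | [_] => 1
  | x :: y :: r => x * contKd (y :: r) + contKd r
theorem contK_snoc : ∀ (l : List Int) (x : Int),
    contK (l ++ [x]) = x * contK l + contKd l ∧ contKd (l ++ [x]) = contK l := by
  intro l
  induction l using contK.induct with
  | case1 => intro x; simp [contK, contKd]
  | case2 y => intro x; simp [contK, contKd]; ring
  | case3 y z r ih1 ih2 =>
    intro x
    have h1 := ih1 x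
    have h2 := ih2 x
    simp only [List.cons_append, contK, contKd] at h1 h2 ⊢
    exact ⟨by linear_combination y * h1.1 + h2.1, by linear_combination y * h1.2 + h2.2⟩

theorem fwd_fold (l : List Int) :
    l.foldl (fun (s : Int × Int) x => (s.2, x * s.2 + s.1)) (0, 1) = (contKd l, contK l) := by
  induction l using List.reverseRecOn with
  | nil => simp [contK, contKd]
  | append_singleton l x ih =>
    rw [List.foldl_append, ih]
    simp only [List.foldl_cons, List.foldl_nil]
    rw [(contK_snoc l x).1, (contK_snoc l x).2]

theorem back_foldr (pre : List Int) : ∀ (suf : List Int), suf ≠ [] →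
    pre.foldr (fun x wd => collapseFraction x wd.reverse) [contK suf, contK suf.tail]
      = [contK (pre ++ suf), contK ((pre ++ suf).tail)] := by
  induction pre with
  | nil => intro suf h; simp
  | cons x pre ih =>
    intro suf h
    rw [List.foldr_cons, ih suf h]
    rcases pre with _ | ⟨p, pre'⟩
    · rcases suf with _ | ⟨s, suf'⟩
      · exact absurd rfl h
      · rcases suf' with _ | ⟨t, suf''⟩
        · simp [collapseFraction, contK]; ring
        · simp [collapseFraction, contK]; ring
    · simp only [List.cons_append, List.tail_cons, collapseFraction, List.reverse_cons]
      simp [contK]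
      ring

theorem gene_len_core : ∀ (n : Nat) (init : List Int),
    ((PySem.List.pyRange 1 ((n : Int) + 1) 1).foldl (fun l i => l ++ [1, i * 2, 1]) init).length
      = init.length + 3 * n := by
  intro n
  induction n with
  | zero => intro init; simp [PySem.List.pyRange_one_eq_nil]
  | succ m ih =>
    intro init
    push_cast
    rw [PySem.List.pyRange_one_succ_right (by omega), List.foldl_append]
    simp only [List.foldl_cons, List.foldl_nil, List.length_append]
    rw [ih]
    simp; omega

theorem toFoldr : ∀ (m : Nat) (a init : List Int), m ≤ a.length →
    (PySem.List.pyRange ((m : Int) - 1) (-1) (-1)).foldl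
        (fun wd i => collapseFraction (PySem.List.pyGetD a i 0) wd.reverse) init
      = (a.take m).foldr (fun x wd => collapseFraction x wd.reverse) init := by
  intro m
  induction m with
  | zero => intro a init h; rw [PySem.List.pyRange_neg_one_eq_nil (by omega)]; simp
  | succ m ih =>
    intro a init h
    have hm : m < a.length := by omega
    push_cast
    have h1 : ((m : Int) + 1) - 1 = (m : Int) := by ring
    rw [h1, PySem.List.pyRange_neg_one_cons (by omega)]
    simp only [List.foldl_cons]
    rw [ih a _ (by omega)]
    have hg : PySem.List.pyGetD a (m : Int) 0 = a[m] := by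
      simp [PySem.List.pyGetD_natCast, List.getD_eq_getElem?_getD, hm]
    have ht : a.take (m + 1) = a.take m ++ [a[m]] := by
      rw [List.take_add_one]
      simp [List.getElem?_eq_getElem hm]
    rw [hg, ht, List.foldr_append]
    simp

theorem split_fold (l : List Int) : ∀ (u v : Int × Int),
    l.foldl (fun (s : Int × Int × Int × Int) x =>
        (s.2.1, x * s.2.1 + s.1, s.2.2.2, x * s.2.2.2 + s.2.2.1)) (u.1, u.2, v.1, v.2)
      = ((l.foldl (fun (s : Int × Int) x => (s.2, x * s.2 + s.1)) u).1,
         (l.foldl (fun (s : Int × Int) x => (s.2, x * s.2 + s.1)) u).2,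
         (l.foldl (fun (s : Int × Int) x => (s.2, x * s.2 + s.1)) v).1,
         (l.foldl (fun (s : Int × Int) x => (s.2, x * s.2 + s.1)) v).2) := by
  induction l with
  | nil => intro u v; simp
  | cons x l ih =>
    intro u v
    simp only [List.foldl_cons]
    exact ih (u.2, x * u.2 + u.1) (v.2, x * v.2 + v.1)

theorem main (L : Int) (h3 : 3 ≤ L) (hmod : PySem.Int.mod L 3 = 0) :
    findApproximation L = findApproximation_alt L := by
  rw [PySem.Int.mod_eq_emod_of_pos (by omega)] at hmod
  have hdvd : (3:Int) ∣ L := Int.dvd_of_emod_eq_zero hmod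
  have htd : L.tdiv 3 = L / 3 := Int.tdiv_eq_ediv_of_dvd hdvd
  set k : Nat := (L / 3).toNat with hk
  have hkL : (k : Int) = L / 3 := Int.toNat_of_nonneg (by omega)
  have harg : L.tdiv 3 + 1 = (k : Int) + 1 := by rw [htd, hkL]
  have hgl : geneList L
      = (PySem.List.pyRange 1 ((k : Int) + 1) 1).foldl (fun l i => l ++ [1, i * 2, 1]) [] := by
    unfold geneList; rw [harg]
  set a := geneList L with ha
  have hlen : a.length = 3 * k := by rw [hgl]; simpa using gene_len_core k []
  have hL : ((a.length : Nat) : Int) = L := by rw [hlen]; omega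
  have hn3 : 3 ≤ a.length := by omega
  obtain ⟨x, y, hxy⟩ : ∃ x y, a.drop (a.length - 2) = [x, y] := by
    have hl2 : (a.drop (a.length - 2)).length = 2 := by simp; omega
    rcases hd : a.drop (a.length - 2) with _ | ⟨x, t⟩
    · rw [hd] at hl2; simp at hl2
    · rcases t with _ | ⟨y, t'⟩
      · rw [hd] at hl2; simp at hl2
      · rcases t' with _ | _
        · exact ⟨x, y, rfl⟩
        · rw [hd] at hl2; simp at hl2
  have hg1 : PySem.List.pyGetD a (L - 1) 0 = y := by
    have e : L - 1 = ((a.length - 1 : Nat) : Int) := by omega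
    rw [e, PySem.List.pyGetD_natCast, List.getD_eq_getElem?_getD]
    have h2 : a[a.length - 1]? = (a.drop (a.length - 2))[1]? := by
      rw [List.getElem?_drop]; congr 1; omega
    rw [h2, hxy]; rfl
  have hg2 : PySem.List.pyGetD a (L - 2) 0 = x := by
    have e : L - 2 = ((a.length - 2 : Nat) : Int) := by omega
    rw [e, PySem.List.pyGetD_natCast, List.getD_eq_getElem?_getD]
    have h2 : a[a.length - 2]? = (a.drop (a.length - 2))[0]? := by
      rw [List.getElem?_drop]; congr 1
    rw [h2, hxy]; rfl
  -- A side
  have hA : findApproximation L = [contK a.tail, contK a] := by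
    show (let divisors := geneList L
      let workingDenom := collapseFraction (PySem.List.pyGetD divisors (L - 2) 0)
          [1, PySem.List.pyGetD divisors (L - 1) 0]
      let workingDenom := (PySem.List.pyRange (L - 3) (-1) (-1)).foldl
          (fun wd i => collapseFraction (PySem.List.pyGetD divisors i 0) wd.reverse) workingDenom
      workingDenom.reverse) = _
    simp only [← ha, hg1, hg2]
    have hwd0 : collapseFraction x [1, y]
        = [contK (a.drop (a.length - 2)), contK (a.drop (a.length - 2)).tail] := by
      simp [collapseFraction, hxy, contK]; ring
    rw [hwd0]
    have hrange : L - 3 = ((a.length - 2 : Nat) : Int) - 1 := by omega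
    rw [hrange, toFoldr (a.length - 2) a _ (by omega)]
    rw [back_foldr (a.take (a.length - 2)) (a.drop (a.length - 2)) (by rw [hxy]; simp)]
    rw [List.take_append_drop]
    simp
  -- B side
  have hB : findApproximation_alt L = [contK a.tail, contK a] := by
    show (let a' := geneList L
      let s := (PySem.List.pyRange 1 L 1).foldl
          (fun (s : Int × Int × Int × Int) i =>
            (s.2.1, PySem.List.pyGetD a' i 0 * s.2.1 + s.1,
             s.2.2.2, PySem.List.pyGetD a' i 0 * s.2.2.2 + s.2.2.1))
          (1, PySem.List.pyGetD a' 0 0, 0, 1)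
      [s.2.2.2, s.2.1]) = _
    simp only [← ha]
    -- seeding from a[0] is exactly one step of the fold over range(0, L) from (0, 1, 1, 0)
    have hstep : (PySem.List.pyRange 1 L 1).foldl
          (fun (s : Int × Int × Int × Int) i =>
            (s.2.1, PySem.List.pyGetD a i 0 * s.2.1 + s.1,
             s.2.2.2, PySem.List.pyGetD a i 0 * s.2.2.2 + s.2.2.1))
          (1, PySem.List.pyGetD a 0 0, 0, 1)
        = (PySem.List.pyRange 0 L 1).foldl
          (fun (s : Int × Int × Int × Int) i =>
            (s.2.1, PySem.List.pyGetD a i 0 * s.2.1 + s.1,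
             s.2.2.2, PySem.List.pyGetD a i 0 * s.2.2.2 + s.2.2.1))
          (0, 1, 1, 0) := by
      rw [PySem.List.pyRange_one_cons (by omega : (0:Int) < L)]
      simp only [List.foldl_cons]
      norm_num
    simp only [hstep]
    rw [← hL]
    have hfold := PySem.List.foldl_pyRange_zero_pyGetD' a 0
      (fun (s : Int × Int × Int × Int) v => (s.2.1, v * s.2.1 + s.1, s.2.2.2, v * s.2.2.2 + s.2.2.1))
      ((0 : Int), (1 : Int), (1 : Int), (0 : Int))
    simp only at hfold
    rw [hfold]
    have hsplit := split_fold a (0, 1) (1, 0)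
    simp only at hsplit
    rw [hsplit]
    obtain ⟨h, t, hht⟩ : ∃ h t, a = h :: t := by
      rcases a with _ | ⟨h, t⟩
      · simp at hn3
      · exact ⟨h, t, rfl⟩
    rw [fwd_fold a, hht]
    simp only [List.foldl_cons, List.tail_cons]
    norm_num
    rw [fwd_fold t]
  rw [hA, hB]

-- ===== VERDICT (by name: the statement is the Claim_ definition above) =====
theorem findApproximation_spec : Claim_equal_findApproximation := by
  intro L _ hpre
  unfold Pre_findApproximation at hpre
  unfold Spec_findApproximation
  exact main L hpre.1 hpre.2
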